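-- pv_equiv track=rewrite | github.com/Vohrad-xa/vohrad_backend | management/commands/format.py | _format_method_spacing
-- ===== SOURCE A (Python) =====
-- def _format_method_spacing(content: str) -> str:
--     """Ensure proper spacing for methods inside classes."""
--     lines = content.split('\n')
--     result = []
--     in_class = False
--     class_indent = 0
--
--     for i, line in enumerate(lines):
--         if line.strip().startswith('class ') and line.strip().endswith(':'):
--             in_class, class_indent = True, len(line) - len(line.lstrip())
--             result.append(line)
--             continue
--
--         if in_class and line.strip() and len(line) - len(line.lstrip()) <= class_indent:
--             in_class = False
--
--         if (in_class and line.strip().startswith('def ') and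
--             i > 0 and result and result[-1].strip() and
--             not result[-1].strip().startswith('"""')):
--             result.append('')
--
--         result.append(line)
--
--     return '\n'.join(result)
-- ===== SOURCE B (Python) =====
-- def _format_method_spacing(content: str) -> str:
--     """Two-pass rewrite: first compute an in-class flag per line, then emit
--     blanks by zipping each line with its predecessor and its flag."""
--     lines = content.split('\n')
--     inside = []
--     in_class = False
--     class_indent = 0
--     for line in lines:
--         s = line.strip()
--         if s.startswith('class ') and s.endswith(':'):
--             in_class = True
--             class_indent = len(line) - len(line.lstrip())
--             inside.append(False)
--         else:
--             if in_class and s and len(line) - len(line.lstrip()) <= class_indent: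
--                 in_class = False
--             inside.append(in_class)
--     out = []
--     for line, prev, ins in zip(lines, [''] + lines, inside):
--         p = prev.strip()
--         if ins and line.strip().startswith('def ') and p and not p.startswith('"""'):
--             out.append('')
--         out.append(line)
--     return '\n'.join(out)
-- ===== Notes on version B (the rewrite author's own statement) =====
-- stated objective: alternative
-- what changed: A's single pass that appends to and inspects its own output list (result[-1], enumerate index) is replaced by two passes: one pass computes a per-line in-class flag list, then the output is built by zipping each line with its original predecessor and its flag, never consulting the output being built.
import Mathlib
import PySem

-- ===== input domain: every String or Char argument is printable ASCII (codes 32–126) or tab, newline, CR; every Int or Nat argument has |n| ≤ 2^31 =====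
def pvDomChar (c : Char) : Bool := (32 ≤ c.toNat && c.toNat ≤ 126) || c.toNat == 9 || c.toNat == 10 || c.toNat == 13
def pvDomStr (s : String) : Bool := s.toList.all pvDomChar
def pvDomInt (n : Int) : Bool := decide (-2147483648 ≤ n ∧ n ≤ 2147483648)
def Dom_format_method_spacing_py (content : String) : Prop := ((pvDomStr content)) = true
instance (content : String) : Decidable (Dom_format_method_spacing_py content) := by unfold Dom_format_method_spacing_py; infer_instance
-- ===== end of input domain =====

-- B replaces A's single pass that inspects its own output list by two passes: a flag pass
-- recording which lines are inside a class, then a zip of each line with its original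
-- predecessor and its flag (objective: alternative decomposition, same cost).

-- shared small helpers (subexpressions both Pythons compute)
def fmsHdr (l : String) : Bool :=
  PySem.Str.startswith (PySem.Str.strip l) "class " && PySem.Str.endswith (PySem.Str.strip l) ":"

-- len(line) - len(line.lstrip())
def fmsInd (l : String) : Int :=
  PySem.Str.len l - PySem.Str.len (PySem.Str.lstrip l)

-- line.strip().startswith('def ')
def fmsDef (l : String) : Bool :=
  PySem.Str.startswith (PySem.Str.strip l) "def "

-- r.strip() and not r.strip().startswith('"""')
def fmsPrevOk (r : String) : Bool :=
  decide (PySem.Str.strip r ≠ "") && !PySem.Str.startswith (PySem.Str.strip r) "\"\"\""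

-- the in_class update both Pythons perform on a non-header line
def fmsIC (ic : Bool) (ci : Int) (l : String) : Bool :=
  if ic && decide (PySem.Str.strip l ≠ "") && decide (fmsInd l ≤ ci) then false else ic

-- ===== PORT A =====
-- loop body of A's for-loop over enumerate(lines); state = (result, in_class, class_indent)
def fmsStepA (st : List String × Bool × Int) (p : Int × String) : List String × Bool × Int :=
  if fmsHdr p.2 then
    (st.1 ++ [p.2], true, fmsInd p.2)
  else
    let in_class := fmsIC st.2.1 st.2.2 p.2
    let result :=
      if in_class && fmsDef p.2 &&
         (decide (0 < p.1) &&
          (match st.1.getLast? with   -- result and result[-1]…, evaluated only when result ≠ []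
           | some r => fmsPrevOk r
           | none => false))
      then st.1 ++ [""] else st.1
    (result ++ [p.2], in_class, st.2.2)

def format_method_spacing_py (content : String) : String :=
  let lines := (PySem.Str.split? content "\n").getD []   -- sep "\n" ≠ "": split? is always some
  PySem.Str.join "\n" ((PySem.List.enumerate lines 0).foldl fmsStepA ([], false, 0)).1

-- ===== PORT B =====
-- pass 1 body: state = (inside, in_class, class_indent)
def fmsStepB1 (st : List Bool × Bool × Int) (line : String) : List Bool × Bool × Int :=
  if fmsHdr line then
    (st.1 ++ [false], true, fmsInd line)
  else
    let in_class := fmsIC st.2.1 st.2.2 line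
    (st.1 ++ [in_class], in_class, st.2.2)

-- pass 2 body: t = (line, (prev, ins))
def fmsStepB2 (out : List String) (t : String × String × Bool) : List String :=
  let out := if t.2.2 && fmsDef t.1 && fmsPrevOk t.2.1 then out ++ [""] else out
  out ++ [t.1]

def format_method_spacing_py_alt (content : String) : String :=
  let lines := (PySem.Str.split? content "\n").getD []   -- sep "\n" ≠ "": split? is always some
  let inside := (lines.foldl fmsStepB1 ([], false, 0)).1
  let out := (lines.zip (("" :: lines).zip inside)).foldl fmsStepB2 []
  PySem.Str.join "\n" out

-- ===== PRECONDITION & SPEC =====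
def Spec_format_method_spacing_py (content : String) (out : String) : Prop := out = format_method_spacing_py_alt content
instance (content : String) (out : String) : Decidable (Spec_format_method_spacing_py content out) := by unfold Spec_format_method_spacing_py; infer_instance

-- ===== CLAIM (what is proved, stated in full; the proofs are below) =====
def Claim_equal_format_method_spacing_py : Prop := ∀ (content : String), Dom_format_method_spacing_py content → Spec_format_method_spacing_py content (format_method_spacing_py content)

-- ===== LEMMAS AND PROOFS =====

-- the common specification both loops compute: output lines from remaining lines, previous line, state
def fmsSpec : List String → String → Bool → Int → List String
  | [], _, _, _ => []
  | l :: ls, prev, ic, ci =>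
    if fmsHdr l then l :: fmsSpec ls l true (fmsInd l)
    else
      (if fmsIC ic ci l && fmsDef l && fmsPrevOk prev then ["", l] else [l])
        ++ fmsSpec ls l (fmsIC ic ci l) ci

-- the flag list pass 1 of B computes
def fmsFlags : List String → Bool → Int → List Bool
  | [], _, _ => []
  | l :: ls, ic, ci =>
    if fmsHdr l then false :: fmsFlags ls true (fmsInd l)
    else fmsIC ic ci l :: fmsFlags ls (fmsIC ic ci l) ci

theorem fmsPrevOk_empty : fmsPrevOk "" = false := by decide

theorem fmsA (ls : List String) : ∀ (i : Int) (acc : List String) (ic : Bool) (ci : Int) (prev : String),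
    ((i = 0 ∧ acc = [] ∧ prev = "") ∨ (0 < i ∧ acc.getLast? = some prev)) →
    ((PySem.List.enumerate ls i).foldl fmsStepA (acc, ic, ci)).1 = acc ++ fmsSpec ls prev ic ci := by
  induction ls with
  | nil => intro i acc ic ci prev _; simp [fmsSpec, PySem.List.enumerate]
  | cons l ls ih =>
    intro i acc ic ci prev h
    have hi' : (0:Int) < i + 1 := by rcases h with ⟨h0, _⟩ | ⟨h0, _⟩ <;> omega
    rw [PySem.List.enumerate_cons, List.foldl_cons]
    by_cases hh : fmsHdr l = true
    · have hs : fmsStepA (acc, ic, ci) (i, l) = (acc ++ [l], true, fmsInd l) := by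
        unfold fmsStepA; rw [if_pos hh]
      rw [hs, ih (i + 1) (acc ++ [l]) true (fmsInd l) l (Or.inr ⟨hi', by simp⟩)]
      simp only [fmsSpec]
      rw [if_pos hh]
      simp
    · have hcond : (decide (0 < i) &&
          (match acc.getLast? with
           | some r => fmsPrevOk r
           | none => false)) = fmsPrevOk prev := by
        rcases h with ⟨h0, hacc, hprev⟩ | ⟨h0, hlast⟩
        · subst h0; subst hacc; subst hprev; simp [fmsPrevOk_empty]
        · rw [hlast]; simp [h0]
      have hs : fmsStepA (acc, ic, ci) (i, l) =
          ((if fmsIC ic ci l && fmsDef l && fmsPrevOk prev then acc ++ [""] else acc) ++ [l],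
            fmsIC ic ci l, ci) := by
        unfold fmsStepA
        rw [if_neg hh]
        show ((if (fmsIC ic ci l && fmsDef l &&
                (decide (0 < i) &&
                 (match acc.getLast? with
                  | some r => fmsPrevOk r
                  | none => false))) = true
              then acc ++ [""] else acc) ++ [l], fmsIC ic ci l, ci) = _
        rw [Bool.and_assoc, hcond, ← Bool.and_assoc]
      rw [hs]
      by_cases hd : (fmsIC ic ci l && fmsDef l && fmsPrevOk prev) = true
      · rw [if_pos hd,
          ih (i + 1) ((acc ++ [""]) ++ [l]) (fmsIC ic ci l) ci l (Or.inr ⟨hi', by simp⟩)]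
        simp only [fmsSpec]
        rw [if_neg hh, if_pos hd]
        simp
      · rw [if_neg hd,
          ih (i + 1) (acc ++ [l]) (fmsIC ic ci l) ci l (Or.inr ⟨hi', by simp⟩)]
        simp only [fmsSpec]
        rw [if_neg hh, if_neg hd]
        simp
  
theorem fmsB1 (ls : List String) : ∀ (acc : List Bool) (ic : Bool) (ci : Int),
    (ls.foldl fmsStepB1 (acc, ic, ci)).1 = acc ++ fmsFlags ls ic ci := by
  induction ls with
  | nil => intro acc ic ci; simp [fmsFlags]
  | cons l ls ih =>
    intro acc ic ci
    rw [List.foldl_cons]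
    by_cases hh : fmsHdr l = true
    · have hs : fmsStepB1 (acc, ic, ci) l = (acc ++ [false], true, fmsInd l) := by
        unfold fmsStepB1; rw [if_pos hh]
      rw [hs, ih]
      simp only [fmsFlags]
      rw [if_pos hh]
      simp
    · have hs : fmsStepB1 (acc, ic, ci) l = (acc ++ [fmsIC ic ci l], fmsIC ic ci l, ci) := by
        unfold fmsStepB1; rw [if_neg hh]
      rw [hs, ih]
      simp only [fmsFlags]
      rw [if_neg hh]
      simp

theorem fmsB2 (ls : List String) : ∀ (prev : String) (ic : Bool) (ci : Int) (out : List String),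
    (ls.zip ((prev :: ls).zip (fmsFlags ls ic ci))).foldl fmsStepB2 out = out ++ fmsSpec ls prev ic ci := by
  induction ls with
  | nil => intro prev ic ci out; simp [fmsFlags, fmsSpec]
  | cons l ls ih =>
    intro prev ic ci out
    by_cases hh : fmsHdr l = true
    · rw [show fmsFlags (l :: ls) ic ci = false :: fmsFlags ls true (fmsInd l) from by
        simp only [fmsFlags]; rw [if_pos hh]]
      simp only [List.zip_cons_cons, List.foldl_cons]
      rw [show fmsStepB2 out (l, prev, false) = out ++ [l] from by
        unfold fmsStepB2; simp]
      rw [ih]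
      simp only [fmsSpec]
      rw [if_pos hh]
      simp
    · rw [show fmsFlags (l :: ls) ic ci = fmsIC ic ci l :: fmsFlags ls (fmsIC ic ci l) ci from by
        simp only [fmsFlags]; rw [if_neg hh]]
      simp only [List.zip_cons_cons, List.foldl_cons]
      rw [show fmsStepB2 out (l, prev, fmsIC ic ci l) =
          (if fmsIC ic ci l && fmsDef l && fmsPrevOk prev then out ++ [""] else out) ++ [l] from rfl]
      rw [ih]
      simp only [fmsSpec]
      rw [if_neg hh]
      by_cases hd : (fmsIC ic ci l && fmsDef l && fmsPrevOk prev) = true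
      · rw [if_pos hd, if_pos hd]; simp
      · rw [if_neg hd, if_neg hd]; simp

-- ===== VERDICT (by name: the statement is the Claim_ definition above) =====
theorem format_method_spacing_py_spec : Claim_equal_format_method_spacing_py := by
  intro content _
  unfold Spec_format_method_spacing_py format_method_spacing_py format_method_spacing_py_alt
  show PySem.Str.join "\n"
      ((PySem.List.enumerate ((PySem.Str.split? content "\n").getD []) 0).foldl fmsStepA
        ([], false, (0:Int))).1 =
    PySem.Str.join "\n"
      ((((PySem.Str.split? content "\n").getD []).zip
          (("" :: ((PySem.Str.split? content "\n").getD [])).zip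
            ((((PySem.Str.split? content "\n").getD []).foldl fmsStepB1 ([], false, (0:Int))).1))).foldl
        fmsStepB2 [])
  rw [fmsA ((PySem.Str.split? content "\n").getD []) 0 [] false 0 "" (Or.inl ⟨rfl, rfl, rfl⟩),
      fmsB1, List.nil_append, List.nil_append, fmsB2, List.nil_append]
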